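-- pv_equiv track=rewrite | github.com/ryan-kirk/everyday-analyst | backend/app/api/compare.py | _normalize_event_categories
-- ===== SOURCE A (Python) =====
-- def _normalize_event_categories(raw_values: list[str] | None) -> list[str] | None:
--     if not raw_values:
--         return None
--
--     normalized: list[str] = []
--     seen: set[str] = set()
--     for raw in raw_values:
--         for value in raw.split(","):
--             category = value.strip().lower()
--             if category and category not in seen:
--                 normalized.append(category)
--                 seen.add(category)
--     return normalized or None
-- ===== SOURCE B (Python) =====
-- def _normalize_event_categories(raw_values):
--     if not raw_values:
--         return None
--
--     def clean(raw):
--         return [c for c in (v.strip().lower() for v in raw.split(",")) if c]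
--
--     # dedupe with no auxiliary seen-set: keep the front element, delete its
--     # later duplicates from the remainder, repeat on what is left
--     items = [c for raw in raw_values for c in clean(raw)]
--     cats = []
--     while items:
--         head = items[0]
--         cats.append(head)
--         items = [x for x in items[1:] if x != head]
--     return cats or None
-- ===== Notes on version B (the rewrite author's own statement) =====
-- stated objective: alternative
-- what changed: A makes one interleaved pass that threads an auxiliary seen-set next to the output; B first flattens all normalized categories and then dedupes with no auxiliary structure at all, by repeatedly taking the front element and filtering its duplicates out of the remainder (quadratic instead of hash-set linear).
import Mathlib
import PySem

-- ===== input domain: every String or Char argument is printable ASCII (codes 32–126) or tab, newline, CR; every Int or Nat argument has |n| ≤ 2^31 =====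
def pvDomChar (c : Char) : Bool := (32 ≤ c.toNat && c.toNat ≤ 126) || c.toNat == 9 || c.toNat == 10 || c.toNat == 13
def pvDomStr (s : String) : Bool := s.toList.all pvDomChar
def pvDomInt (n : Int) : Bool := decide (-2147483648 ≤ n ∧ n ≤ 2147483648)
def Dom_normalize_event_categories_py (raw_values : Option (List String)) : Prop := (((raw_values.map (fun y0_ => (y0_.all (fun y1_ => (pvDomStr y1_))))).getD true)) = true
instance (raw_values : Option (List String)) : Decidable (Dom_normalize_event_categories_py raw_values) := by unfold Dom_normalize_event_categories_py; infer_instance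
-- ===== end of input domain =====

-- B flattens all normalized categories first and then dedupes with no auxiliary seen-set,
-- by repeatedly taking the front element and filtering its duplicates out of the remainder.

-- shared helper: raw.split(",") (sep is the non-empty literal ",", so split? is always some)
def pvSplitComma (s : String) : List String := (PySem.Str.split? s ",").getD []

-- ===== PORT A =====
-- A-side helper: the body of A's inner loop (append category if non-empty and unseen)
def pvCatStep (st : List String × PySem.Set String) (value : String) : List String × PySem.Set String :=
  let category := PySem.Str.lower (PySem.Str.strip value)
  if category ≠ "" ∧ ¬ PySem.Set.contains st.2 category then
    (st.1 ++ [category], PySem.Set.add st.2 category)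
  else st

def normalize_event_categories_py (raw_values : Option (List String)) : Option (List String) :=
  match raw_values with
  | none => none
  | some rvs =>
    if rvs = [] then none
    else
      let st := rvs.foldl (fun st raw => (pvSplitComma raw).foldl pvCatStep st)
        (([], PySem.Set.empty) : List String × PySem.Set String)
      if st.1 = [] then none else some st.1

-- ===== PORT B =====
-- B-side helper clean(raw): the normalized non-empty categories of one raw string
def pvClean (raw : String) : List String :=
  ((pvSplitComma raw).map (fun v => PySem.Str.lower (PySem.Str.strip v))).filter (fun c => c ≠ "")

-- B-side while loop: append the front element to cats, filter its duplicates out of the rest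
def pvDedupLoop (cats : List String) : List String → List String
  | [] => cats
  | head :: rest => pvDedupLoop (cats ++ [head]) (rest.filter (fun x => x ≠ head))
termination_by items => items.length
decreasing_by
  simp only [List.length_unattach, List.length_cons]
  exact Nat.lt_succ_of_le (le_trans (List.length_filter_le _ _) (by simp))

def normalize_event_categories_py_alt (raw_values : Option (List String)) : Option (List String) :=
  match raw_values with
  | none => none
  | some rvs =>
    if rvs = [] then none
    else
      let cats := pvDedupLoop [] (rvs.flatMap pvClean)
      if cats = [] then none else some cats

-- ===== PRECONDITION & SPEC =====
def Spec_normalize_event_categories_py (raw_values : Option (List String)) (out : Option (List String)) : Prop := out = normalize_event_categories_py_alt raw_values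
instance (raw_values : Option (List String)) (out : Option (List String)) : Decidable (Spec_normalize_event_categories_py raw_values out) := by unfold Spec_normalize_event_categories_py; infer_instance

-- ===== CLAIM (what is proved, stated in full; the proofs are below) =====
def Claim_equal_normalize_event_categories_py : Prop := ∀ (raw_values : Option (List String)), Dom_normalize_event_categories_py raw_values → Spec_normalize_event_categories_py raw_values (normalize_event_categories_py raw_values)

-- ===== LEMMAS AND PROOFS =====

-- folding A's step over the flattened list equals A's nested loops
theorem foldl_step_flatMap (rvs : List String) (st : List String × PySem.Set String) :
    (rvs.flatMap (fun raw => pvSplitComma raw)).foldl pvCatStep st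
      = rvs.foldl (fun st raw => (pvSplitComma raw).foldl pvCatStep st) st := by
  induction rvs generalizing st with
  | nil => simp
  | cons r t ih => simp [List.flatMap_cons, List.foldl_append, List.foldl_cons, ih]

-- empty categories are no-ops for A's step, so normalizing and filtering first preserves the fold
theorem foldl_step_filter (l : List String) (st : List String × PySem.Set String) :
    l.foldl pvCatStep st
      = ((l.map (fun v => PySem.Str.lower (PySem.Str.strip v))).filter (fun c => c ≠ "")).foldl
          (fun st c => if ¬ PySem.Set.contains st.2 c then (st.1 ++ [c], PySem.Set.add st.2 c) else st) st := by
  induction l generalizing st with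
  | nil => simp
  | cons v t ih =>
    simp only [List.foldl_cons, List.map_cons, List.filter_cons]
    rw [ih]
    by_cases h : PySem.Str.lower (PySem.Str.strip v) = ""
    · have hstep : pvCatStep st v = st := by
        unfold pvCatStep; rw [if_neg]; simp [h]
      rw [hstep, h]
      simp
    · have hstep : pvCatStep st v
          = if ¬ PySem.Set.contains st.2 (PySem.Str.lower (PySem.Str.strip v)) then
              (st.1 ++ [PySem.Str.lower (PySem.Str.strip v)],
               PySem.Set.add st.2 (PySem.Str.lower (PySem.Str.strip v))) else st := by
        unfold pvCatStep
        by_cases hc : PySem.Set.contains st.2 (PySem.Str.lower (PySem.Str.strip v))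
        · have hm : PySem.Str.lower (PySem.Str.strip v) ∈ st.2 := by simpa using hc
          rw [if_neg (by simp [hm]), if_neg (by simp [hm])]
        · rw [if_pos ⟨h, hc⟩, if_pos hc]
      rw [hstep]
      simp [h]

-- A's conditional-append loop, started from equal list/set components s, computes exactly
-- B's head-filter while loop with accumulator s on the elements not already in s
theorem foldl_step_dedupLoop (l : List String) (s : PySem.Set String) :
    l.foldl (fun (st : List String × PySem.Set String) c =>
        if ¬ PySem.Set.contains st.2 c then (st.1 ++ [c], PySem.Set.add st.2 c) else st) (s, s)
      = (pvDedupLoop s (l.filter (fun c => ¬ c ∈ s)),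
         pvDedupLoop s (l.filter (fun c => ¬ c ∈ s))) := by
  induction l generalizing s with
  | nil => simp [pvDedupLoop]
  | cons c t ih =>
    simp only [List.foldl_cons]
    by_cases h : PySem.Set.contains s c
    · have hm : c ∈ s := by simpa using h
      rw [List.filter_cons_of_neg (by simp [hm])]
      simp only [h, not_true, if_false]
      exact ih s
    · have hm : c ∉ s := by simpa using h
      rw [List.filter_cons_of_pos (by simpa using hm)]
      rw [if_pos (show ¬ PySem.Set.contains ((s, s) : List String × PySem.Set String).2 c from h)]
      rw [show PySem.Set.add s c = s ++ [c] from by simp [PySem.Set.add]; simpa using h]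
      rw [ih (s ++ [c])]
      have hfil : t.filter (fun x => decide (¬ x ∈ s ++ [c]))
          = (t.filter (fun x => decide (¬ x ∈ s))).filter (fun x => decide (x ≠ c)) := by
        rw [List.filter_filter]
        apply List.filter_congr
        intro x _
        by_cases hx : x ∈ s <;> by_cases hxc : x = c <;> simp [hx, hxc]
      rw [hfil]
      have hd : pvDedupLoop s (c :: t.filter (fun x => decide (¬ x ∈ s)))
          = pvDedupLoop (s ++ [c]) ((t.filter (fun x => decide (¬ x ∈ s))).filter (fun x => decide (x ≠ c))) := by
        rw [pvDedupLoop]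
      rw [hd]

-- ===== VERDICT (by name: the statement is the Claim_ definition above) =====
theorem normalize_event_categories_py_spec : Claim_equal_normalize_event_categories_py := by
  intro raw_values _
  unfold Spec_normalize_event_categories_py normalize_event_categories_py normalize_event_categories_py_alt
  match raw_values with
  | none => rfl
  | some rvs =>
    by_cases hrvs : rvs = []
    · simp [hrvs]
    · simp only [hrvs, if_false]
      rw [← foldl_step_flatMap, foldl_step_filter]
      have hfil : ((rvs.flatMap (fun raw => pvSplitComma raw)).map
            (fun v => PySem.Str.lower (PySem.Str.strip v))).filter (fun c => c ≠ "")
          = rvs.flatMap pvClean := by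
        unfold pvClean
        rw [List.map_flatMap, List.filter_flatMap]
      rw [hfil,
        show (([], PySem.Set.empty) : List String × PySem.Set String)
          = ((PySem.Set.empty, PySem.Set.empty) : List String × PySem.Set String) from rfl,
        foldl_step_dedupLoop]
      have : (rvs.flatMap pvClean).filter (fun c => ¬ c ∈ (PySem.Set.empty : PySem.Set String))
          = rvs.flatMap pvClean := by
        apply List.filter_eq_self.mpr
        intro x _
        simp [PySem.Set.empty]
      rw [this]
      simp
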